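-- pv_equiv track=rewrite | github.com/andersonhwang/eStation_Developer_Demo | Python/fileHelper.py | _normalize_mask
-- ===== SOURCE A (Python) =====
-- def _normalize_mask(mask):
--     if mask == 0:
--         return None
--
--     shift = 0
--     temp = mask
--     while (temp & 1) == 0:
--         temp >>= 1
--         shift += 1
--
--     bits = 0
--     while (temp & 1) == 1:
--         temp >>= 1
--         bits += 1
--
--     max_value = (1 << bits) - 1 if bits > 0 else 0
--     return shift, bits, max_value
-- ===== SOURCE B (Python) =====
-- def _normalize_mask(mask):
--     if mask == 0:
--         return None
--     # locate the lowest set bit: mask ^ (mask - 1) is a block of (shift+1) ones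
--     shift = (mask ^ (mask - 1)).bit_length() - 1
--     t = mask >> shift
--     # count the run of trailing ones of t: t ^ (t + 1) is a block of (bits+1) ones
--     bits = (t ^ (t + 1)).bit_length() - 1
--     return shift, bits, (1 << bits) - 1
-- ===== Notes on version B (the rewrite author's own statement) =====
-- stated objective: alternative
-- what changed: A's two while-loops (count trailing zeros, then count the run of trailing ones) are replaced by closed-form bit arithmetic: xor with the predecessor/successor plus bit_length, with no loops; Pre_ excludes only negative powers of two, where A's second loop never terminates.
-- outside the precondition, e.g. on _normalize_mask(-1): A does not finish within the time limit, B returns (0, 0, 0); on _normalize_mask(-4): A does not finish within the time limit, B returns (2, 0, 0)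
import Mathlib
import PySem

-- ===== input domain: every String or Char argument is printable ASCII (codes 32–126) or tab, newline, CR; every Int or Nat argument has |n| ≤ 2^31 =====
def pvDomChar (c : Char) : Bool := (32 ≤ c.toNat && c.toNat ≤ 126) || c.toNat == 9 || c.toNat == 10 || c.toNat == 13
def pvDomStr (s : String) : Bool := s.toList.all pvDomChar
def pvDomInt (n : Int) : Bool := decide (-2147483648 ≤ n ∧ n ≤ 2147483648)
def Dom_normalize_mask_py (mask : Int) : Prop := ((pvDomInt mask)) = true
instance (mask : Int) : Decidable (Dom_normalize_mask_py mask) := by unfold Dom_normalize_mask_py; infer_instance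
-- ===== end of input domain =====

-- B replaces A's two while-loops by closed-form bit arithmetic (xor/bit_length tricks); equal on Pre_ (all masks except negative powers of two, where A's second loop never terminates).

-- ===== PORT A =====
-- 'while (temp & 1) == 0: temp >>= 1; shift += 1' — fuel makes the loop total in Lean;
-- for mask > 0 the fuel mask.natAbs + 1 is never exhausted (trailing zeros ≤ natAbs).
def pvTzLoop : Nat → Int → Int → Int × Int
  | 0, temp, shift => (temp, shift)
  | f + 1, temp, shift =>
    if PySem.Int.band temp 1 = 0 then pvTzLoop f (temp >>> 1) (shift + 1)
    else (temp, shift)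

-- 'while (temp & 1) == 1: temp >>= 1; bits += 1'
def pvOnesLoop : Nat → Int → Int → Int × Int
  | 0, temp, bits => (temp, bits)
  | f + 1, temp, bits =>
    if PySem.Int.band temp 1 = 1 then pvOnesLoop f (temp >>> 1) (bits + 1)
    else (temp, bits)

def normalize_mask_py (mask : Int) : Option (Int × Int × Int) :=
  if mask = 0 then none
  else
    let r1 := pvTzLoop (mask.natAbs + 1) mask 0
    let r2 := pvOnesLoop (mask.natAbs + 1) r1.1 0
    let bits := r2.2
    -- (1 << bits) - 1 if bits > 0 else 0; bits ≥ 0 always, so .toNat is exact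
    let max_value := if bits > 0 then (1 : Int) <<< bits.toNat - 1 else 0
    some (r1.2, bits, max_value)

-- ===== PORT B =====
def normalize_mask_py_alt (mask : Int) : Option (Int × Int × Int) :=
  if mask = 0 then none
  else
    -- (mask ^ (mask-1)).bit_length() - 1 ; xor with mask-1 is odd and ≠ 0, so shift ≥ 0 and .toNat is exact
    let shift := (PySem.Int.bitLength (PySem.Int.bxor mask (mask - 1)) : Int) - 1
    let t := mask >>> shift.toNat
    -- (t ^ (t+1)).bit_length() - 1 ; likewise bits ≥ 0
    let bits := (PySem.Int.bitLength (PySem.Int.bxor t (t + 1)) : Int) - 1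
    some (shift, bits, (1 : Int) <<< bits.toNat - 1)

-- ===== PRECONDITION & SPEC =====
-- A returns on every mask except negative powers of two (mask = -2^k): there temp reaches -1
-- and the second while-loop never terminates (-1 >> 1 == -1 and -1 & 1 == 1 in Python).
def Pre_normalize_mask_py (mask : Int) : Prop :=
  0 ≤ mask ∨ mask.natAbs ≠ 2 ^ Nat.log2 mask.natAbs
instance (mask : Int) : Decidable (Pre_normalize_mask_py mask) := by unfold Pre_normalize_mask_py; infer_instance
def pvWitness_normalize_mask_py : Int := (12)

def Spec_normalize_mask_py (mask : Int) (out : Option (Int × Int × Int)) : Prop := out = normalize_mask_py_alt mask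
instance (mask : Int) (out : Option (Int × Int × Int)) : Decidable (Spec_normalize_mask_py mask out) := by unfold Spec_normalize_mask_py; infer_instance

-- ===== CLAIM (what is proved, stated in full; the proofs are below) =====
def Claim_equal_normalize_mask_py : Prop := ∀ (mask : Int), Dom_normalize_mask_py mask → Pre_normalize_mask_py mask → Spec_normalize_mask_py mask (normalize_mask_py mask)

-- ===== LEMMAS AND PROOFS =====

-- trailing zeros of n (0 for n = 0)
def pvTz (n : Nat) : Nat :=
  if h : n = 0 then 0
  else if n % 2 = 0 then pvTz (n / 2) + 1 else 0
termination_by n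
decreasing_by exact Nat.div_lt_self (Nat.pos_of_ne_zero h) (by omega)

-- trailing ones of n
def pvTo (n : Nat) : Nat :=
  if h : n % 2 = 1 then pvTo (n / 2) + 1 else 0
termination_by n
decreasing_by exact Nat.div_lt_self (by omega) (by omega)

theorem pvTz_even (n : Nat) (h0 : 0 < n) (h2 : n % 2 = 0) : pvTz n = pvTz (n / 2) + 1 := by
  rw [pvTz]; simp [Nat.pos_iff_ne_zero.mp h0, h2]

theorem pvTz_odd (n : Nat) (h2 : n % 2 = 1) : pvTz n = 0 := by
  rw [pvTz]; split_ifs <;> omega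

theorem pvTo_odd (n : Nat) (h2 : n % 2 = 1) : pvTo n = pvTo (n / 2) + 1 := by
  rw [pvTo]; simp [h2]

theorem pvTo_even (n : Nat) (h2 : n % 2 = 0) : pvTo n = 0 := by
  rw [pvTo]; split_ifs <;> omega

theorem pvTz_le (n : Nat) : pvTz n ≤ n := by
  induction n using Nat.strong_induction_on with
  | _ n ih =>
    rw [pvTz]
    split_ifs with h1 h2
    · omega
    · have := ih (n / 2) (Nat.div_lt_self (Nat.pos_of_ne_zero h1) (by omega))
      omega
    · omega

theorem pvTo_le (n : Nat) : pvTo n ≤ n := by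
  induction n using Nat.strong_induction_on with
  | _ n ih =>
    rw [pvTo]
    split_ifs with h1
    · have := ih (n / 2) (Nat.div_lt_self (by omega) (by omega))
      omega
    · omega

theorem band_one_natCast (n : Nat) : PySem.Int.band (n : Int) 1 = ((n % 2 : Nat) : Int) := by
  have h1 : (1 : Int) = ((1 : Nat) : Int) := rfl
  rw [h1, PySem.Int.band_natCast, Nat.and_one_is_mod]

theorem shiftRight_one_natCast (n : Nat) : (n : Int) >>> (1 : Int) = ((n / 2 : Nat) : Int) := rfl

theorem pvTzLoop_eq (fuel n : Nat) (s : Int) (hn : 0 < n) (hf : pvTz n ≤ fuel) :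
    pvTzLoop fuel (n : Int) s = (((n / 2 ^ pvTz n : Nat) : Int), s + (pvTz n : Int)) := by
  induction fuel generalizing n s with
  | zero =>
    have htz : pvTz n = 0 := by omega
    simp [pvTzLoop, htz]
  | succ f ih =>
    by_cases h2 : n % 2 = 0
    · have htz := pvTz_even n hn h2
      have hcond : PySem.Int.band (n : Int) 1 = 0 := by
        rw [band_one_natCast, h2]; rfl
      rw [pvTzLoop, if_pos hcond, shiftRight_one_natCast,
        ih (n / 2) (s + 1) (by omega) (by omega)]
      have hdiv : n / 2 / 2 ^ pvTz (n / 2) = n / 2 ^ (pvTz (n / 2) + 1) := by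
        rw [Nat.div_div_eq_div_mul, pow_succ, mul_comm]
      rw [hdiv, htz]
      have : s + 1 + ((pvTz (n / 2) : Nat) : Int) = s + ((pvTz (n / 2) + 1 : Nat) : Int) := by
        push_cast; ring
      rw [this]
    · have h2' : n % 2 = 1 := by omega
      have htz := pvTz_odd n h2'
      have hcond : ¬ PySem.Int.band (n : Int) 1 = 0 := by
        rw [band_one_natCast, h2']; decide
      rw [pvTzLoop, if_neg hcond, htz]
      simp

theorem pvOnesLoop_eq (fuel n : Nat) (b : Int) (hf : pvTo n ≤ fuel) :
    pvOnesLoop fuel (n : Int) b = (((n / 2 ^ pvTo n : Nat) : Int), b + (pvTo n : Int)) := by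
  induction fuel generalizing n b with
  | zero =>
    have hto : pvTo n = 0 := by omega
    simp [pvOnesLoop, hto]
  | succ f ih =>
    by_cases h2 : n % 2 = 1
    · have hto := pvTo_odd n h2
      have hcond : PySem.Int.band (n : Int) 1 = 1 := by
        rw [band_one_natCast, h2]; rfl
      rw [pvOnesLoop, if_pos hcond, shiftRight_one_natCast,
        ih (n / 2) (b + 1) (by omega)]
      have hdiv : n / 2 / 2 ^ pvTo (n / 2) = n / 2 ^ (pvTo (n / 2) + 1) := by
        rw [Nat.div_div_eq_div_mul, pow_succ, mul_comm]
      rw [hdiv, hto]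
      have : b + 1 + ((pvTo (n / 2) : Nat) : Int) = b + ((pvTo (n / 2) + 1 : Nat) : Int) := by
        push_cast; ring
      rw [this]
    · have h2' : n % 2 = 0 := by omega
      have hto := pvTo_even n h2'
      have hcond : ¬ PySem.Int.band (n : Int) 1 = 1 := by
        rw [band_one_natCast, h2']; decide
      rw [pvOnesLoop, if_neg hcond, hto]
      simp

-- after dividing out the trailing zeros the number is odd
theorem pvTz_div_odd (n : Nat) (hn : 0 < n) : (n / 2 ^ pvTz n) % 2 = 1 := by
  induction n using Nat.strong_induction_on with
  | _ n ih =>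
    by_cases h2 : n % 2 = 0
    · rw [pvTz_even n hn h2, pow_succ, mul_comm, ← Nat.div_div_eq_div_mul]
      exact ih (n / 2) (Nat.div_lt_self hn (by omega)) (by omega)
    · have h2' : n % 2 = 1 := by omega
      rw [pvTz_odd n h2']
      simpa using h2'

-- xor step: (2a + x) ^^^ (2b + y) = 2(a ^^^ b) + (x xor y), via Nat.xor_bit
theorem pvXorStep (a b : Nat) (x y : Bool) :
    (2 * a + x.toNat) ^^^ (2 * b + y.toNat) = 2 * (a ^^^ b) + (x != y).toNat := by
  have := Nat.xor_bit x a y b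
  simpa [Nat.bit_val] using this

theorem pvBitLen_one : PySem.Int.bitLength ((1 : Nat) : Int) = 1 := by decide

theorem pvBitLen_two_mul_add_one (k : Nat) :
    PySem.Int.bitLength ((2 * k + 1 : Nat) : Int) = PySem.Int.bitLength (k : Int) + 1 := by
  rw [PySem.Int.bitLength_natCast (m := 2 * k + 1) (by omega)]
  congr 2
  omega

-- (n ^ (n+1)).bit_length() = trailing ones of n + 1
theorem pvBitLen_xor_succ (n : Nat) :
    PySem.Int.bitLength ((n ^^^ (n + 1) : Nat) : Int) = pvTo n + 1 := by
  induction n using Nat.strong_induction_on with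
  | _ n ih =>
    rcases Nat.even_or_odd n with ⟨m, hm⟩ | ⟨m, hm⟩
    · have hm2 : n = 2 * m := by omega
      subst hm2
      have h1 : 2 * m ^^^ (2 * m + 1) = 1 := by
        have := pvXorStep m m false true
        simpa using this
      rw [h1, pvBitLen_one, pvTo_even (2 * m) (by omega)]
    · subst hm
      have h1 : (2 * m + 1) ^^^ (2 * m + 1 + 1) = 2 * (m ^^^ (m + 1)) + 1 := by
        have := pvXorStep m (m + 1) true false
        simpa [mul_add] using this
      have hdiv : (2 * m + 1) / 2 = m := by omega
      rw [h1, pvBitLen_two_mul_add_one, ih m (by omega),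
        pvTo_odd (2 * m + 1) (by omega), hdiv]

-- (n ^ (n-1)).bit_length() = trailing zeros of n + 1, for n > 0
theorem pvBitLen_xor_pred (n : Nat) (hn : 0 < n) :
    PySem.Int.bitLength ((n ^^^ (n - 1) : Nat) : Int) = pvTz n + 1 := by
  induction n using Nat.strong_induction_on with
  | _ n ih =>
    rcases Nat.even_or_odd n with ⟨m, hm⟩ | ⟨m, hm⟩
    · have hm2 : n = 2 * m := by omega
      subst hm2
      have hm0 : 0 < m := by omega
      have hsub : 2 * m - 1 = 2 * (m - 1) + 1 := by omega
      have h1 : 2 * m ^^^ (2 * (m - 1) + 1) = 2 * (m ^^^ (m - 1)) + 1 := by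
        have := pvXorStep m (m - 1) false true
        simpa using this
      have hdiv : (2 * m) / 2 = m := by omega
      rw [hsub, h1, pvBitLen_two_mul_add_one, ih m (by omega) hm0,
        pvTz_even (2 * m) hn (by omega), hdiv]
    · subst hm
      have h1 : (2 * m + 1) ^^^ (2 * m + 1 - 1) = 1 := by
        have := pvXorStep m m true false
        simpa using this
      rw [h1, pvBitLen_one, pvTz_odd (2 * m + 1) (by omega)]

theorem pvShiftRight_natCast (n k : Nat) : (n : Int) >>> k = ((n >>> k : Nat) : Int) := rfl

theorem pvShiftRight_negSucc (v k : Nat) : (Int.negSucc v) >>> k = Int.negSucc (v >>> k) := rfl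

-- ==== negative masks (two's complement) ====

theorem pvBxor_negSucc (a b : Nat) :
    PySem.Int.bxor (Int.negSucc a) (Int.negSucc b) = ((a ^^^ b : Nat) : Int) := by
  simp [PySem.Int.bxor]

theorem pvBandNeg_even (v : Nat) (h : v % 2 = 1) : PySem.Int.band (Int.negSucc v) 1 = 0 := by
  rw [PySem.Int.band_one, PySem.Int.mod_eq_emod_of_pos (by omega : (0:Int) < 2), Int.negSucc_eq]
  omega

theorem pvBandNeg_odd (v : Nat) (h : v % 2 = 0) : PySem.Int.band (Int.negSucc v) 1 = 1 := by
  rw [PySem.Int.band_one, PySem.Int.mod_eq_emod_of_pos (by omega : (0:Int) < 2), Int.negSucc_eq]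
  omega

theorem shiftRight_one_negSucc (v : Nat) : (Int.negSucc v) >>> (1 : Int) = Int.negSucc (v / 2) := rfl

-- the first loop on a negative temp strips the trailing ONES of v (temp = -(v+1))
theorem pvTzLoopNeg_eq (fuel v : Nat) (s : Int) (hf : pvTo v ≤ fuel) :
    pvTzLoop fuel (Int.negSucc v) s = (Int.negSucc (v / 2 ^ pvTo v), s + (pvTo v : Int)) := by
  induction fuel generalizing v s with
  | zero =>
    have hto : pvTo v = 0 := by omega
    simp [pvTzLoop, hto]
  | succ f ih =>
    by_cases h2 : v % 2 = 1
    · have hto := pvTo_odd v h2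
      rw [pvTzLoop, if_pos (pvBandNeg_even v h2), shiftRight_one_negSucc,
        ih (v / 2) (s + 1) (by omega)]
      have hdiv : v / 2 / 2 ^ pvTo (v / 2) = v / 2 ^ (pvTo (v / 2) + 1) := by
        rw [Nat.div_div_eq_div_mul, pow_succ, mul_comm]
      rw [hdiv, hto]
      have : s + 1 + ((pvTo (v / 2) : Nat) : Int) = s + ((pvTo (v / 2) + 1 : Nat) : Int) := by
        push_cast; ring
      rw [this]
    · have h2' : v % 2 = 0 := by omega
      have hto := pvTo_even v h2'
      rw [pvTzLoop, if_neg (by rw [pvBandNeg_odd v h2']; decide), hto]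
      simp

-- the second loop on a negative temp strips the trailing ZEROS of w (temp = -(w+1), 0 < w)
theorem pvOnesLoopNeg_eq (fuel w : Nat) (b : Int) (hw : 0 < w) (hf : pvTz w ≤ fuel) :
    pvOnesLoop fuel (Int.negSucc w) b = (Int.negSucc (w / 2 ^ pvTz w), b + (pvTz w : Int)) := by
  induction fuel generalizing w b with
  | zero =>
    have htz : pvTz w = 0 := by omega
    simp [pvOnesLoop, htz]
  | succ f ih =>
    by_cases h2 : w % 2 = 0
    · have htz := pvTz_even w hw h2
      rw [pvOnesLoop, if_pos (pvBandNeg_odd w h2), shiftRight_one_negSucc,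
        ih (w / 2) (b + 1) (by omega) (by omega)]
      have hdiv : w / 2 / 2 ^ pvTz (w / 2) = w / 2 ^ (pvTz (w / 2) + 1) := by
        rw [Nat.div_div_eq_div_mul, pow_succ, mul_comm]
      rw [hdiv, htz]
      have : b + 1 + ((pvTz (w / 2) : Nat) : Int) = b + ((pvTz (w / 2) + 1 : Nat) : Int) := by
        push_cast; ring
      rw [this]
    · have h2' : w % 2 = 1 := by omega
      have htz := pvTz_odd w h2'
      rw [pvOnesLoop, if_neg (by rw [pvBandNeg_even w h2']; decide), htz]
      simp

-- the bits below pvTo v are all ones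
theorem pvTo_mod (v : Nat) : v % 2 ^ pvTo v = 2 ^ pvTo v - 1 := by
  induction v using Nat.strong_induction_on with
  | _ v ih =>
    by_cases h2 : v % 2 = 1
    · obtain ⟨q, rfl⟩ : ∃ q, v = 2 * q + 1 := ⟨v / 2, by omega⟩
      have hq : (2 * q + 1) / 2 = q := by omega
      rw [pvTo_odd _ (by omega), hq]
      have hih := ih q (by omega)
      have hp : 0 < 2 ^ pvTo q := pow_pos (by omega) _
      have hmul : (2 * q) % (2 * 2 ^ pvTo q) = 2 * (q % 2 ^ pvTo q) :=
        Nat.mul_mod_mul_left 2 q (2 ^ pvTo q)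
      have hlt : q % 2 ^ pvTo q < 2 ^ pvTo q := Nat.mod_lt _ hp
      have hpow : (2 : Nat) ^ (pvTo q + 1) = 2 * 2 ^ pvTo q := by rw [pow_succ]; ring
      rw [hpow]
      have hstep : (2 * q + 1) % (2 * 2 ^ pvTo q) = 2 * (q % 2 ^ pvTo q) + 1 := by
        rw [Nat.add_mod, hmul, Nat.mod_eq_of_lt (by omega : (1 : Nat) < 2 * 2 ^ pvTo q),
          Nat.mod_eq_of_lt (by omega)]
      rw [hstep, hih]
      omega
    · rw [pvTo_even v (by omega)]
      have h1 : (2 : Nat) ^ 0 = 1 := rfl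
      rw [h1]
      omega

-- after dividing out the trailing ones the number is even
theorem pvTo_div_even (v : Nat) : (v / 2 ^ pvTo v) % 2 = 0 := by
  induction v using Nat.strong_induction_on with
  | _ v ih =>
    by_cases h2 : v % 2 = 1
    · rw [pvTo_odd v h2, pow_succ, mul_comm, ← Nat.div_div_eq_div_mul]
      exact ih (v / 2) (by omega)
    · rw [pvTo_even v (by omega)]
      simpa using h2


-- trailing ones of u = trailing zeros of u + 1
theorem pvTo_pred_eq_pvTz (u : Nat) : pvTo u = pvTz (u + 1) := by
  induction u using Nat.strong_induction_on with
  | _ u ih =>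
    by_cases h2 : u % 2 = 1
    · obtain ⟨q, rfl⟩ : ∃ q, u = 2 * q + 1 := ⟨u / 2, by omega⟩
      have hq : (2 * q + 1) / 2 = q := by omega
      have hq2 : (2 * q + 1 + 1) / 2 = q + 1 := by omega
      rw [pvTo_odd _ (by omega), hq, ih q (by omega),
        pvTz_even (2 * q + 1 + 1) (by omega) (by omega), hq2]
    · rw [pvTo_even u (by omega), pvTz_odd (u + 1) (by omega)]

-- A on a positive mask
theorem pvA_pos (n : Nat) (hn : 0 < n) :
    normalize_mask_py (n : Int) =
      some ((pvTz n : Int), (pvTo (n / 2 ^ pvTz n) : Int),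
        (1 : Int) <<< pvTo (n / 2 ^ pvTz n) - 1) := by
  have h0 : ((n : Int)) ≠ 0 := by exact_mod_cast Nat.pos_iff_ne_zero.mp hn
  have hnA : ((n : Int)).natAbs = n := Int.natAbs_natCast n
  have hodd : (n / 2 ^ pvTz n) % 2 = 1 := pvTz_div_odd n hn
  have hto : 0 < pvTo (n / 2 ^ pvTz n) := by rw [pvTo_odd _ hodd]; omega
  simp only [normalize_mask_py, if_neg h0, hnA]
  rw [pvTzLoop_eq (n + 1) n 0 hn (by have := pvTz_le n; omega)]
  rw [pvOnesLoop_eq (n + 1) (n / 2 ^ pvTz n) 0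
    (by have h1 := pvTo_le (n / 2 ^ pvTz n); have h2 := Nat.div_le_self n (2 ^ pvTz n); omega)]
  have hgt : (0 : Int) < ((pvTo (n / 2 ^ pvTz n) : Nat) : Int) := by exact_mod_cast hto
  simp only [if_pos hgt, Int.toNat_natCast, zero_add]

-- B on a positive mask
theorem pvB_pos (n : Nat) (hn : 0 < n) :
    normalize_mask_py_alt (n : Int) =
      some ((pvTz n : Int), (pvTo (n / 2 ^ pvTz n) : Int),
        (1 : Int) <<< pvTo (n / 2 ^ pvTz n) - 1) := by
  have h0 : ((n : Int)) ≠ 0 := by exact_mod_cast Nat.pos_iff_ne_zero.mp hn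
  simp only [normalize_mask_py_alt, if_neg h0]
  have hc1 : (n : Int) - 1 = ((n - 1 : Nat) : Int) := by omega
  rw [hc1, PySem.Int.bxor_natCast, pvBitLen_xor_pred n hn]
  have hs : ((pvTz n + 1 : Nat) : Int) - 1 = ((pvTz n : Nat) : Int) := by push_cast; ring
  rw [hs, Int.toNat_natCast, pvShiftRight_natCast, Nat.shiftRight_eq_div_pow]
  have hc2 : ((n / 2 ^ pvTz n : Nat) : Int) + 1 = ((n / 2 ^ pvTz n + 1 : Nat) : Int) := by
    push_cast; ring
  rw [hc2, PySem.Int.bxor_natCast, pvBitLen_xor_succ (n / 2 ^ pvTz n)]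
  have hb : ((pvTo (n / 2 ^ pvTz n) + 1 : Nat) : Int) - 1
      = ((pvTo (n / 2 ^ pvTz n) : Nat) : Int) := by push_cast; ring
  rw [hb, Int.toNat_natCast]

-- A on a negative non-power-of-two mask -(v+1); w := v / 2^(trailing ones of v) > 0
theorem pvA_neg (v : Nat) (hw : 0 < v / 2 ^ pvTo v) :
    normalize_mask_py (Int.negSucc v) =
      some ((pvTo v : Int), (pvTz (v / 2 ^ pvTo v) : Int),
        (1 : Int) <<< pvTz (v / 2 ^ pvTo v) - 1) := by
  have h0 : (Int.negSucc v) ≠ 0 := Int.negSucc_ne_zero v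
  have hnA : (Int.negSucc v).natAbs = v + 1 := rfl
  set w := v / 2 ^ pvTo v with hwdef
  have heven : w % 2 = 0 := pvTo_div_even v
  have htzw : 0 < pvTz w := by rw [pvTz_even w hw heven]; omega
  simp only [normalize_mask_py, if_neg h0, hnA]
  rw [pvTzLoopNeg_eq (v + 1 + 1) v 0 (by have := pvTo_le v; omega)]
  rw [pvOnesLoopNeg_eq (v + 1 + 1) w 0 hw
    (by have h1 := pvTz_le w; have h2 := Nat.div_le_self v (2 ^ pvTo v); omega)]
  have hgt : (0 : Int) < ((pvTz w : Nat) : Int) := by exact_mod_cast htzw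
  simp only [if_pos hgt, Int.toNat_natCast, zero_add]

-- B on a negative non-power-of-two mask
theorem pvB_neg (v : Nat) (hw : 0 < v / 2 ^ pvTo v) :
    normalize_mask_py_alt (Int.negSucc v) =
      some ((pvTo v : Int), (pvTz (v / 2 ^ pvTo v) : Int),
        (1 : Int) <<< pvTz (v / 2 ^ pvTo v) - 1) := by
  have h0 : (Int.negSucc v) ≠ 0 := Int.negSucc_ne_zero v
  simp only [normalize_mask_py_alt, if_neg h0]
  have hc1 : (Int.negSucc v) - 1 = Int.negSucc (v + 1) := by
    rw [Int.negSucc_eq, Int.negSucc_eq]; push_cast; ring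
  rw [hc1, pvBxor_negSucc, pvBitLen_xor_succ v]
  have hs : ((pvTo v + 1 : Nat) : Int) - 1 = ((pvTo v : Nat) : Int) := by push_cast; ring
  rw [hs, Int.toNat_natCast, pvShiftRight_negSucc, Nat.shiftRight_eq_div_pow]
  set w := v / 2 ^ pvTo v with hwdef
  have hc2 : (Int.negSucc w) + 1 = Int.negSucc (w - 1) := by
    rw [Int.negSucc_eq, Int.negSucc_eq]; omega
  rw [hc2, pvBxor_negSucc]
  have hx : w ^^^ (w - 1) = (w - 1) ^^^ (w - 1 + 1) := by
    rw [Nat.xor_comm]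
    congr 1
    omega
  rw [hx, pvBitLen_xor_succ (w - 1)]
  have hto1 : pvTo (w - 1) = pvTz w := by
    have : w - 1 + 1 = w := by omega
    calc pvTo (w - 1) = pvTz (w - 1 + 1) := pvTo_pred_eq_pvTz (w - 1)
      _ = pvTz w := by rw [this]
  rw [hto1]
  have hb : ((pvTz w + 1 : Nat) : Int) - 1 = ((pvTz w : Nat) : Int) := by push_cast; ring
  rw [hb, Int.toNat_natCast]

-- ===== VERDICT (by name: the statement is the Claim_ definition above) =====
theorem normalize_mask_py_spec : Claim_equal_normalize_mask_py := by
  intro mask _ hpre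
  unfold Spec_normalize_mask_py
  rcases lt_trichotomy mask 0 with hneg | h0 | hpos
  · obtain ⟨v, rfl⟩ := Int.eq_negSucc_of_lt_zero hneg
    have hnA : (Int.negSucc v).natAbs = v + 1 := rfl
    have hnp : v + 1 ≠ 2 ^ Nat.log2 (v + 1) := by
      rcases hpre with h | h
      · exact absurd h (not_le.mpr (Int.negSucc_lt_zero v))
      · rwa [hnA] at h
    have hw : 0 < v / 2 ^ pvTo v := by
      rcases Nat.eq_zero_or_pos (v / 2 ^ pvTo v) with hz0 | h
      swap
      · exact h
      exfalso
      have hmod := pvTo_mod v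
      have hvv : v % 2 ^ pvTo v = v := by
        have h := Nat.div_add_mod v (2 ^ pvTo v)
        rw [hz0] at h
        simpa using h
      have hp : 0 < 2 ^ pvTo v := pow_pos (by omega) _
      have hv1 : v + 1 = 2 ^ pvTo v := by omega
      exact hnp (by rw [hv1, Nat.log2_two_pow])
    rw [pvA_neg v hw, pvB_neg v hw]
  · subst h0
    simp [normalize_mask_py, normalize_mask_py_alt]
  · obtain ⟨n, rfl⟩ : ∃ n : Nat, mask = (n : Int) :=
      ⟨mask.toNat, (Int.toNat_of_nonneg (le_of_lt hpos)).symm⟩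
    exact (pvA_pos n (by exact_mod_cast hpos)).trans (pvB_pos n (by exact_mod_cast hpos)).symm
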